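-- pv_equiv track=rewrite | github.com/ZiqiBen/College_Application_Agent | src/writing_agent/nodes/rag_node.py | retrieve_from_corpus
-- ===== SOURCE A (Python) =====
-- from typing import Dict, Any, List
--
-- def retrieve_from_corpus(
--     corpus: Dict[str, str],
--     keywords: List[str],
--     top_k: int = 5
-- ) -> tuple:
--     """
--     Simple keyword-based retrieval from corpus.
--
--     In production, this should use vector similarity search.
--     """
--
--     keyword_set = set([kw.lower() for kw in keywords])
--     scored_chunks = []
--
--     for chunk_id, chunk_text in corpus.items():
--         chunk_lower = chunk_text.lower()
--
--         # Calculate keyword overlap score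
--         score = sum(1 for kw in keyword_set if kw in chunk_lower)
--
--         if score > 0:
--             scored_chunks.append((chunk_id, chunk_text, score))
--
--     # Sort by score
--     scored_chunks.sort(key=lambda x: x[2], reverse=True)
--
--     # Return top_k
--     retrieved_ids = [chunk_id for chunk_id, _, _ in scored_chunks[:top_k]]
--     retrieved_texts = [text for _, text, _ in scored_chunks[:top_k]]
--
--     return retrieved_texts, retrieved_ids
-- ===== SOURCE B (Python) =====
-- def _score(kws, text):
--     low = text.lower()
--     return len([k for k in kws if k in low])
--
--
-- def retrieve_from_corpus(corpus, keywords, top_k=5):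
--     """Selection by descending score level over a deduplicated keyword list (no sort, no buckets)."""
--     kws = []
--     for kw in keywords:
--         k = kw.lower()
--         if k not in kws:
--             kws.append(k)
--     scored = [(cid, txt, _score(kws, txt)) for cid, txt in corpus.items()]
--     texts, ids = [], []
--     for level in range(len(kws), 0, -1):
--         for cid, txt, sc in scored:
--             if sc == level:
--                 texts.append(txt)
--                 ids.append(cid)
--     return texts[:top_k], ids[:top_k]
-- ===== Notes on version B (the rewrite author's own statement) =====
-- stated objective: alternative
-- what changed: B drops the comparison sort entirely: it deduplicates the lowered keywords into a plain list, scores every chunk once by filtering that list, and then emits chunks by scanning the scored list once per score level from the highest possible score down to 1, preserving corpus order within each level.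
import Mathlib
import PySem

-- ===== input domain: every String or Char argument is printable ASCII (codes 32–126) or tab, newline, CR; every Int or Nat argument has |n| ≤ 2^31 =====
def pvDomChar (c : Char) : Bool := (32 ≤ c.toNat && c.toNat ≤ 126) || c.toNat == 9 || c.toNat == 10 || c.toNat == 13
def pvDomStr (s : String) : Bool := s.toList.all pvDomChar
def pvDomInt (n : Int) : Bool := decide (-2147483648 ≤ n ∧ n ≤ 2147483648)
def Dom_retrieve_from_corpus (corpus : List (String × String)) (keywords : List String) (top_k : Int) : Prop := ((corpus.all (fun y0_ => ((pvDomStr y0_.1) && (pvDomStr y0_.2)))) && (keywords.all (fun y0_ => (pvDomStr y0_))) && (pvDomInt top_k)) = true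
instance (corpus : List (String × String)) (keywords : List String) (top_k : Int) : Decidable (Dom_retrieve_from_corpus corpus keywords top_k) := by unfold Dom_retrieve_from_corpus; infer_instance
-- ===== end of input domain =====

-- B replaces A's score-and-comparison-sort by selection per descending score level:
-- one scan of the scored chunks for each possible score, highest first (alternative
-- decomposition, same return value).

-- ===== PORT A =====
-- score = sum(1 for kw in keyword_set if kw in chunk_lower)
def pvScoreOf (keyword_set : List String) (chunk_lower : String) : Int :=
  keyword_set.foldl (fun acc kw => if PySem.Str.isIn kw chunk_lower then acc + 1 else acc) 0
def retrieve_from_corpus (corpus : List (String × String)) (keywords : List String) (top_k : Int) : List String × List String :=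
  let keyword_set : PySem.Set String := PySem.Set.ofList (keywords.map PySem.Str.lower)
  let scored_chunks := corpus.foldl (fun acc p =>
      let chunk_lower := PySem.Str.lower p.2
      let score := pvScoreOf keyword_set chunk_lower
      if score > 0 then acc ++ [(p.1, p.2, score)] else acc) []
  let sorted_chunks := PySem.List.sorted scored_chunks (fun t => t.2.2) true
  let top := PySem.List.slice sorted_chunks none (some top_k)
  (top.map (fun t => t.2.1), top.map (fun t => t.1))

-- ===== PORT B =====
-- _score(kws, text) = len([k for k in kws if k in text.lower()])
def pvCountHits (kws : List String) (text : String) : Int :=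
  ((kws.filter (fun k => PySem.Str.isIn k (PySem.Str.lower text))).length : Int)
def retrieve_from_corpus_alt (corpus : List (String × String)) (keywords : List String) (top_k : Int) : List String × List String :=
  let kws := keywords.foldl (fun ks kw =>
      let k := PySem.Str.lower kw
      if ks.contains k then ks else ks ++ [k]) []
  let scored := corpus.map (fun p => (p.1, p.2, pvCountHits kws p.2))
  let res := (PySem.List.pyRange (kws.length : Int) 0 (-1)).foldl (fun acc level =>
      scored.foldl (fun acc t =>
        if t.2.2 == level then (acc.1 ++ [t.2.1], acc.2 ++ [t.1]) else acc) acc)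
    (([], []) : List String × List String)
  (PySem.List.slice res.1 none (some top_k), PySem.List.slice res.2 none (some top_k))

-- ===== PRECONDITION & SPEC =====
def Spec_retrieve_from_corpus (corpus : List (String × String)) (keywords : List String) (top_k : Int) (out : List String × List String) : Prop := out = retrieve_from_corpus_alt corpus keywords top_k
instance (corpus : List (String × String)) (keywords : List String) (top_k : Int) (out : List String × List String) : Decidable (Spec_retrieve_from_corpus corpus keywords top_k out) := by unfold Spec_retrieve_from_corpus; infer_instance

-- ===== CLAIM (what is proved, stated in full; the proofs are below) =====
def Claim_equal_retrieve_from_corpus : Prop := ∀ (corpus : List (String × String)) (keywords : List String) (top_k : Int), Dom_retrieve_from_corpus corpus keywords top_k → Spec_retrieve_from_corpus corpus keywords top_k (retrieve_from_corpus corpus keywords top_k)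

-- ===== LEMMAS AND PROOFS =====
def pvSc (kws : List String) (q : String × String) : Int := pvScoreOf kws (PySem.Str.lower q.2)
def pvTrip (kws : List String) (q : String × String) : String × String × Int := (q.1, q.2, pvSc kws q)
def pvBuckets (l : List (String × String × Int)) : Nat → List (String × String × Int)
  | 0 => []
  | s + 1 => l.filter (fun t => decide (t.2.2 = (s : Int) + 1)) ++ pvBuckets l s

theorem pvScoreOf_aux (low : String) (kws : List String) : ∀ acc : Int,
    acc ≤ kws.foldl (fun acc kw => if PySem.Str.isIn kw low then acc + 1 else acc) acc ∧
    kws.foldl (fun acc kw => if PySem.Str.isIn kw low then acc + 1 else acc) acc ≤ acc + kws.length := by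
  induction kws with
  | nil => intro acc; simp
  | cons kw t ih =>
    intro acc
    simp only [List.foldl_cons, List.length_cons]
    split_ifs with hkw
    · rcases ih (acc + 1) with ⟨h1, h2⟩; constructor <;> push_cast <;> omega
    · rcases ih acc with ⟨h1, h2⟩; constructor <;> push_cast <;> omega

theorem pvScoreOf_bounds (kws : List String) (low : String) :
    0 ≤ pvScoreOf kws low ∧ pvScoreOf kws low ≤ kws.length := by
  have := pvScoreOf_aux low kws 0
  unfold pvScoreOf
  omega

theorem pvScored_eq (kws : List String) (l : List (String × String)) :
    l.foldl (fun acc p =>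
      let chunk_lower := PySem.Str.lower p.2
      let score := pvScoreOf kws chunk_lower
      if score > 0 then acc ++ [(p.1, p.2, score)] else acc) []
    = (l.filter (fun q => decide (0 < pvSc kws q))).map (pvTrip kws) := by
  have hfun : (fun (acc : List (String × String × Int)) (p : String × String) =>
      let chunk_lower := PySem.Str.lower p.2
      let score := pvScoreOf kws chunk_lower
      if score > 0 then acc ++ [(p.1, p.2, score)] else acc)
    = fun acc x => if (fun q => decide (0 < pvSc kws q)) x = true then acc ++ [pvTrip kws x] else acc := by
    funext acc p
    simp [pvSc, pvTrip]
  rw [hfun, PySem.List.foldl_append_if]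
  simp

theorem pvMem_buckets (l : List (String × String × Int)) (K : Nat) (y : String × String × Int)
    (hy : y ∈ pvBuckets l K) : 1 ≤ y.2.2 ∧ y.2.2 ≤ (K : Int) := by
  induction K with
  | zero => simp [pvBuckets] at hy
  | succ s ih =>
    simp only [pvBuckets, List.mem_append, List.mem_filter, decide_eq_true_eq] at hy
    rcases hy with ⟨_, h⟩ | h
    · push_cast; omega
    · have := ih h; push_cast at this ⊢; omega

theorem pvBuckets_nil (K : Nat) : pvBuckets [] K = [] := by
  induction K with
  | zero => rfl
  | succ s ih => simp [pvBuckets, ih]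

theorem pvInsertBy_append_left {α : Type} (before : α → α → Bool) (x : α) (as bs : List α)
    (h : ∀ y ∈ as, before x y = false) :
    PySem.List.insertBy before x (as ++ bs) = as ++ PySem.List.insertBy before x bs := by
  induction as with
  | nil => simp
  | cons a t ih =>
    have ha : before x a = false := h a (by simp)
    simp only [List.cons_append, PySem.List.insertBy, ha]
    simp only [Bool.false_eq_true, if_false, List.cons.injEq, true_and]
    exact ih (fun y hy => h y (by simp [hy]))

theorem pvBuckets_append_high (l : List (String × String × Int)) (x : String × String × Int)
    (K : Nat) (hx : (K : Int) < x.2.2) : pvBuckets (l ++ [x]) K = pvBuckets l K := by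
  induction K with
  | zero => rfl
  | succ s ih =>
    have hs : (s : Int) < x.2.2 := by push_cast at hx ⊢; omega
    simp only [pvBuckets, List.filter_append, ih hs]
    have : List.filter (fun t => decide (t.2.2 = (s : Int) + 1)) [x] = [] := by
      simp only [List.filter_cons, List.filter_nil, decide_eq_true_eq]
      rw [if_neg]; omega
    rw [this, List.append_nil]

theorem pvInsert_buckets (x : String × String × Int) (K : Nat) (l : List (String × String × Int))
    (h1 : 1 ≤ x.2.2) (h2 : x.2.2 ≤ (K : Int)) :
    PySem.List.insertBy (fun a b => decide ((fun t : String × String × Int => t.2.2) b < (fun t : String × String × Int => t.2.2) a)) x (pvBuckets l K)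
      = pvBuckets (l ++ [x]) K := by
  induction K with
  | zero => simp at h2; omega
  | succ K ih =>
    simp only [pvBuckets]
    have hB : ∀ y ∈ l.filter (fun t => decide (t.2.2 = (K : Int) + 1)),
        (fun a b => decide ((fun t : String × String × Int => t.2.2) b < (fun t : String × String × Int => t.2.2) a)) x y = false := by
      intro y hy
      simp only [List.mem_filter, decide_eq_true_eq] at hy
      simp only [decide_eq_false_iff_not, not_lt]
      push_cast at h2
      omega
    rw [pvInsertBy_append_left _ _ _ _ hB]
    by_cases hx : x.2.2 = (K : Int) + 1
    · have hfront : PySem.List.insertBy (fun a b => decide ((fun t : String × String × Int => t.2.2) b < (fun t : String × String × Int => t.2.2) a)) x (pvBuckets l K) = x :: pvBuckets l K := by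
        cases h' : pvBuckets l K with
        | nil => simp [PySem.List.insertBy]
        | cons b t =>
          have hb := pvMem_buckets l K b (by rw [h']; exact List.mem_cons_self)
          have hbx : (fun a b => decide ((fun t : String × String × Int => t.2.2) b < (fun t : String × String × Int => t.2.2) a)) x b = true := by
            simp only [decide_eq_true_eq]
            omega
          simp [PySem.List.insertBy, hbx]
      rw [hfront, pvBuckets_append_high l x K (by omega)]
      have hfx : List.filter (fun t => decide (t.2.2 = (K : Int) + 1)) [x] = [x] := by
        simp [hx]
      rw [List.filter_append, hfx]
      simp
    · have hx' : x.2.2 ≤ (K : Int) := by push_cast at h2; omega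
      rw [ih hx']
      have hfx : List.filter (fun t => decide (t.2.2 = (K : Int) + 1)) [x] = [] := by
        simp [hx]
      rw [List.filter_append, hfx, List.append_nil]

theorem pvSorted_eq_buckets (l : List (String × String × Int)) (K : Nat)
    (h : ∀ t ∈ l, 1 ≤ t.2.2 ∧ t.2.2 ≤ (K : Int)) :
    PySem.List.sorted l (fun t => t.2.2) true = pvBuckets l K := by
  rw [PySem.List.sorted_rev_eq_foldl_insertBy]
  revert h
  induction l using List.reverseRecOn with
  | nil => intro _; simp [pvBuckets_nil]
  | append_singleton l x ih =>
    intro h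
    rw [List.foldl_append]
    simp only [List.foldl_cons, List.foldl_nil]
    rw [ih (fun t ht => h t (List.mem_append_left _ ht))]
    exact pvInsert_buckets x K l (h x (by simp)).1 (h x (by simp)).2

-- B-side lemmas
theorem pvKws_eq (keywords : List String) :
    keywords.foldl (fun ks kw =>
      let k := PySem.Str.lower kw
      if ks.contains k then ks else ks ++ [k]) []
    = PySem.Set.ofList (keywords.map PySem.Str.lower) := by
  rw [PySem.Set.ofList_eq_foldl, List.foldl_map]
  apply PySem.List.foldl_congr_mem
  intro ks kw _
  show (if ks.contains (PySem.Str.lower kw) then ks else ks ++ [PySem.Str.lower kw]) = _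
  rw [PySem.Set.add_eq_ite]
  by_cases h : PySem.Str.lower kw ∈ ks <;> simp [h]

theorem pvCount_aux (p : String → Bool) (l : List String) : ∀ acc : Int,
    l.foldl (fun acc kw => if p kw then acc + 1 else acc) acc
      = acc + ((l.filter p).length : Int) := by
  induction l with
  | nil => intro acc; simp
  | cons k t ih =>
    intro acc
    simp only [List.foldl_cons, List.filter_cons]
    by_cases h : p k = true
    · rw [h, if_pos rfl, ih]
      simp
      push_cast
      ring
    · rw [if_neg h, if_neg h, ih]

theorem pvCountHits_eq (kws : List String) (text : String) :
    pvCountHits kws text = pvScoreOf kws (PySem.Str.lower text) := by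
  show ((kws.filter (fun k => PySem.Str.isIn k (PySem.Str.lower text))).length : Int) = _
  unfold pvScoreOf
  rw [pvCount_aux]
  simp

theorem pvInner (scored : List (String × String × Int)) (level : Int) :
    ∀ acc : List String × List String,
    scored.foldl (fun acc t =>
        if t.2.2 == level then (acc.1 ++ [t.2.1], acc.2 ++ [t.1]) else acc) acc
    = (acc.1 ++ (scored.filter (fun t => decide (t.2.2 = level))).map (fun t => t.2.1),
       acc.2 ++ (scored.filter (fun t => decide (t.2.2 = level))).map (fun t => t.1)) := by
  induction scored with
  | nil => intro acc; simp
  | cons t l ih =>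
    intro acc
    simp only [List.foldl_cons, List.filter_cons]
    by_cases h : t.2.2 = level
    · simp only [h, beq_self_eq_true, if_true, decide_true, List.map_cons]
      rw [ih]
      simp
    · have hb : (t.2.2 == level) = false := by simp [h]
      simp only [hb, Bool.false_eq_true, if_false, decide_eq_true_eq, h]
      rw [ih]

theorem pvOuter (scored : List (String × String × Int)) (K : Nat) :
    ∀ acc : List String × List String,
    (PySem.List.pyRange (K : Int) 0 (-1)).foldl (fun acc level =>
      scored.foldl (fun acc t =>
        if t.2.2 == level then (acc.1 ++ [t.2.1], acc.2 ++ [t.1]) else acc) acc) acc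
    = (acc.1 ++ (pvBuckets scored K).map (fun t => t.2.1),
       acc.2 ++ (pvBuckets scored K).map (fun t => t.1)) := by
  induction K with
  | zero =>
    intro acc
    rw [PySem.List.pyRange_neg_one_eq_nil (by norm_num)]
    simp [pvBuckets]
  | succ K ih =>
    intro acc
    rw [PySem.List.pyRange_neg_one_cons (by push_cast; omega)]
    simp only [List.foldl_cons]
    rw [pvInner]
    have hc : ((K + 1 : Nat) : Int) - 1 = (K : Int) := by push_cast; ring
    rw [hc, ih]
    have hc2 : ((K + 1 : Nat) : Int) = (K : Int) + 1 := by push_cast; ring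
    simp only [pvBuckets, hc2, List.map_append, List.append_assoc]

theorem pvBuckets_full (kws : List String) (corpus : List (String × String)) (K : Nat) :
    pvBuckets (corpus.map (pvTrip kws)) K
      = pvBuckets ((corpus.filter (fun q => decide (0 < pvSc kws q))).map (pvTrip kws)) K := by
  induction K with
  | zero => rfl
  | succ s ih =>
    simp only [pvBuckets, ih, List.filter_map, List.filter_filter]
    congr 2
    apply List.filter_congr
    intro q _
    by_cases h : pvSc kws q = (s : Int) + 1
    · have : (0 : Int) < pvSc kws q := by omega
      simp [Function.comp, pvTrip, h]
    · simp [Function.comp, pvTrip, h]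

theorem pvSlice_map {α β : Type} (f : α → β) (l : List α) (b : Int) :
    PySem.List.slice (l.map f) none (some b) = (PySem.List.slice l none (some b)).map f := by
  by_cases hb : 0 ≤ b
  · rw [PySem.List.slice_to _ hb, PySem.List.slice_to _ hb, List.map_take]
  · have hk : 0 < (-b).toNat := by omega
    have hbk : b = -(((-b).toNat : Nat) : Int) := by omega
    rw [hbk, PySem.List.slice_to_neg_natCast _ _ hk, PySem.List.slice_to_neg_natCast _ _ hk,
      List.map_take, List.length_map]

theorem pvMain (corpus : List (String × String)) (keywords : List String) (top_k : Int) :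
    retrieve_from_corpus corpus keywords top_k = retrieve_from_corpus_alt corpus keywords top_k := by
  simp only [retrieve_from_corpus, retrieve_from_corpus_alt]
  rw [pvKws_eq]
  set kws := PySem.Set.ofList (keywords.map PySem.Str.lower) with hkws
  have hscored : corpus.map (fun p => (p.1, p.2, pvCountHits kws p.2)) = corpus.map (pvTrip kws) := by
    apply List.map_congr_left
    intro q _
    simp only [pvTrip, pvSc, pvCountHits_eq]
  have hbounds : ∀ t ∈ ((corpus.filter (fun q => decide (0 < pvSc kws q))).map (pvTrip kws)),
      1 ≤ t.2.2 ∧ t.2.2 ≤ (kws.length : Int) := by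
    intro t ht
    rcases List.mem_map.1 ht with ⟨q, hq, rfl⟩
    rcases List.mem_filter.1 hq with ⟨-, hpos⟩
    simp only [decide_eq_true_eq] at hpos
    have := pvScoreOf_bounds kws (PySem.Str.lower q.2)
    exact ⟨by simp only [pvTrip]; simp only [pvSc] at hpos ⊢; omega,
           by simp only [pvTrip]; simp only [pvSc]; omega⟩
  rw [pvScored_eq, pvSorted_eq_buckets _ _ hbounds, hscored, pvOuter, ← pvBuckets_full]
  simp only [List.nil_append]
  rw [pvSlice_map, pvSlice_map]
-- ===== VERDICT (by name: the statement is the Claim_ definition above) =====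
theorem retrieve_from_corpus_spec : Claim_equal_retrieve_from_corpus := by
  intro corpus keywords top_k _
  exact pvMain corpus keywords top_k
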